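-- pv_equiv track=rewrite | github.com/WarlonZeng/CS-1114 | rec10.py | createWholeList
-- ===== SOURCE A (Python) =====
-- def createWholeList(shoppingList):
--     'creates the whole list that includes the number of foods'
--     itemList = []
--     quantList = []
--     wholeList = []
--     for item in shoppingList:
--         if item not in itemList:
--             quantList.append(shoppingList.count(item))
--             itemList.append(item)
--     for item in range(len(quantList)):
--         wholeList.append([itemList[item], quantList[item]])
--     wholeList.sort()
--     return wholeList
-- ===== SOURCE B (Python) =====
-- def createWholeList(shoppingList):
--     'creates the whole list that includes the number of foods'
--     s = sorted(shoppingList)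
--     if not s:
--         return []
--     wholeList = []
--     cur = s[0]
--     cnt = 0
--     for x in s:
--         if x == cur:
--             cnt += 1
--         else:
--             wholeList.append([cur, cnt])
--             cur = x
--             cnt = 1
--     wholeList.append([cur, cnt])
--     return wholeList
-- ===== Notes on version B (the rewrite author's own statement) =====
-- stated objective: faster
-- what changed: Replaces A's O(n^2) first-occurrence scan with a full shoppingList.count() rescan per distinct item plus a final sort of the pairs by a single sorted() call followed by one linear run-length grouping pass over the sorted copy.
import Mathlib
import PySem

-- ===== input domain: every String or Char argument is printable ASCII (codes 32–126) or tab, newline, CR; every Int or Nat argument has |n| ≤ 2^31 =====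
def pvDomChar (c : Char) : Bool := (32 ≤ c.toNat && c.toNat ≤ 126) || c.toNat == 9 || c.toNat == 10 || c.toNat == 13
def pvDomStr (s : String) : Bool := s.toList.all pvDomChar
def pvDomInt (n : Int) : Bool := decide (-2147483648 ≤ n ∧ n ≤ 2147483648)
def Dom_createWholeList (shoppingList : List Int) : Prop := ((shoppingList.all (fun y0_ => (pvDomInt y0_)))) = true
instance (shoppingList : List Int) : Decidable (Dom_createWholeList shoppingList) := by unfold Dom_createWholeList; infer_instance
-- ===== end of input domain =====

-- B replaces A's membership-test loop with repeated .count() scans and a final sort by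
-- sort-first-then-one-run-length-pass grouping (objective: faster).

-- ===== PORT A =====
def createWholeList (shoppingList : List Int) : List (List Int) :=
  let p := shoppingList.foldl
    (fun (acc : List Int × List Int) item =>
      if item ∈ acc.1 then acc
      else (acc.1 ++ [item], acc.2 ++ [((PySem.List.count shoppingList item : Nat) : Int)]))
    ([], [])
  let itemList := p.1
  let quantList := p.2
  let wholeList := (PySem.List.pyRange 0 (PySem.List.len quantList)).foldl
    (fun (acc : List (List Int)) i =>
      acc ++ [[PySem.List.pyGetD itemList i 0, PySem.List.pyGetD quantList i 0]]) []
  PySem.List.sorted wholeList (fun x => x) false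

-- ===== PORT B =====
def createWholeList_alt (shoppingList : List Int) : List (List Int) :=
  let s := PySem.List.sorted shoppingList (fun x => x) false
  match s with
  | [] => []
  | s0 :: _ =>
    let st := s.foldl
      (fun (acc : List (List Int) × Int × Int) x =>
        if x = acc.2.1 then (acc.1, acc.2.1, acc.2.2 + 1)
        else (acc.1 ++ [[acc.2.1, acc.2.2]], x, 1))
      ([], s0, 0)
    st.1 ++ [[st.2.1, st.2.2]]

-- ===== PRECONDITION & SPEC =====
def Spec_createWholeList (shoppingList : List Int) (out : List (List Int)) : Prop := out = createWholeList_alt shoppingList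
instance (shoppingList : List Int) (out : List (List Int)) : Decidable (Spec_createWholeList shoppingList out) := by unfold Spec_createWholeList; infer_instance

-- ===== CLAIM (what is proved, stated in full; the proofs are below) =====
def Claim_equal_createWholeList : Prop := ∀ (shoppingList : List Int), Dom_createWholeList shoppingList → Spec_createWholeList shoppingList (createWholeList shoppingList)

-- ===== LEMMAS AND PROOFS =====

-- canonical form both programs are reduced to: distinct items in increasing order, each with its count
def pvCanon (xs : List Int) : List (List Int) :=
  (PySem.List.sorted (PySem.List.dedup xs) (fun v => v) false).map
    (fun v => [v, ((List.count v xs : Nat) : Int)])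

-- run-length grouping, recursion form of B's loop
def pvGo (cur cnt : Int) : List Int → List (List Int)
  | [] => [[cur, cnt]]
  | y :: ys => if y = cur then pvGo cur (cnt + 1) ys else [cur, cnt] :: pvGo y 1 ys

def pvRuns : List Int → List (List Int)
  | [] => []
  | x :: ys => pvGo x 1 ys

-- ---- A side ----

theorem pv_foldA (L : List Int) :
    ∀ (xs items quants : List Int),
      quants = items.map (fun v => ((PySem.List.count L v : Nat) : Int)) →
      xs.foldl (fun (acc : List Int × List Int) item =>
          if item ∈ acc.1 then acc
          else (acc.1 ++ [item], acc.2 ++ [((PySem.List.count L item : Nat) : Int)])) (items, quants)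
        = (xs.foldl PySem.Set.add items,
           (xs.foldl PySem.Set.add items).map (fun v => ((PySem.List.count L v : Nat) : Int))) := by
  intro xs
  induction xs with
  | nil => intro items quants h; simp [h]
  | cons x xs ih =>
      intro items quants h
      by_cases hx : x ∈ items
      · have hadd : PySem.Set.add items x = items := by
          simp [PySem.Set.add, hx]
        simpa [List.foldl_cons, hx, hadd] using ih items quants h
      · have hadd : PySem.Set.add items x = items ++ [x] := by
          simp [PySem.Set.add, hx]
        have h2 : quants ++ [((PySem.List.count L x : Nat) : Int)]
            = (items ++ [x]).map (fun v => ((PySem.List.count L v : Nat) : Int)) := by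
          simp [h]
        simpa [List.foldl_cons, hx, hadd] using ih (items ++ [x]) _ h2

theorem pv_wholeList (c : Int → Int) (items quants : List Int)
    (h : quants = items.map c) :
    (PySem.List.pyRange 0 (PySem.List.len quants)).foldl
      (fun (acc : List (List Int)) i =>
        acc ++ [[PySem.List.pyGetD items i 0, PySem.List.pyGetD quants i 0]]) []
      = items.map (fun v => [v, c v]) := by
  have hlen : quants.length = items.length := by simp [h]
  rw [PySem.List.len_eq, PySem.List.pyRange_zero_natCast]
  rw [PySem.List.foldl_append_singleton_eq_map
    (fun i => [PySem.List.pyGetD items i 0, PySem.List.pyGetD quants i 0])]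
  rw [List.nil_append, List.map_map]
  apply List.ext_getElem
  · simp [hlen]
  · intro i h1 h2
    simp only [List.getElem_map, List.getElem_range, Function.comp_apply,
      PySem.List.pyGetD_natCast]
    have hi : i < items.length := by simpa using h2
    have hiq : i < quants.length := by simpa [hlen] using h2
    rw [List.getD_eq_getElem _ _ hi, List.getD_eq_getElem _ _ hiq]
    simp [h]

-- sorting with the core lexicographic LT on List Int is sorting with Mathlib's linear order
theorem pv_sorted_bridge (ws : List (List Int)) :
    @PySem.List.sorted (List Int) (List Int) List.instLT (fun a b => a.decidableLT b) ws (fun x => x) false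
      = @PySem.List.sorted (List Int) (List Int) List.instLinearOrder.toLT
          LinearOrder.toDecidableLT ws (fun x => x) false := by
  rw [@PySem.List.sorted_eq_foldl_insertBy (List Int) (List Int) List.instLT
        (fun a b => a.decidableLT b) ws (fun x => x),
      @PySem.List.sorted_eq_foldl_insertBy (List Int) (List Int) List.instLinearOrder.toLT
        LinearOrder.toDecidableLT ws (fun x => x)]
  have hfun : (fun (a b : List Int) => @decide (@LT.lt _ List.instLT a b) (a.decidableLT b))
      = (fun a b => @decide (@LT.lt _ List.instLinearOrder.toLT a b)
          (@LinearOrder.toDecidableLT _ List.instLinearOrder a b)) := by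
    funext a b
    have hiff : (@LT.lt _ List.instLT a b) ↔ (@LT.lt _ List.instLinearOrder.toLT a b) := by
      rw [show (@LT.lt _ List.instLT a b) = List.lt a b from rfl, List.lt_iff_lex_lt]
    exact decide_eq_decide.mpr hiff
  rw [hfun]

theorem pv_A_eq (xs : List Int) : createWholeList xs = pvCanon xs := by
  unfold createWholeList
  rw [pv_foldA xs xs [] [] (by simp)]
  dsimp only
  rw [pv_wholeList (fun v => ((PySem.List.count xs v : Nat) : Int)) _ _ rfl]
  rw [show List.foldl PySem.Set.add [] xs = PySem.Set.ofList xs from rfl]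
  rw [pv_sorted_bridge]
  apply PySem.List.sorted_eq_of_perm_of_pairwise_lt
  · unfold pvCanon
    rw [PySem.List.dedup_eq_ofList]
    have hperm := PySem.List.sorted_perm (PySem.Set.ofList xs) (fun v : Int => v) false
    have := hperm.map (fun v => [v, ((List.count v xs : Nat) : Int)])
    simp only [PySem.List.count_eq]
    exact this
  · unfold pvCanon
    have h := PySem.List.sorted_ofList_pairwise_lt (xs := xs)
    rw [PySem.List.dedup_eq_ofList]
    exact List.Pairwise.map _ (fun a b hab => List.Lex.rel hab) h

-- ---- B side ----

theorem pv_foldB_eq_go :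
    ∀ (rest : List Int) (whole : List (List Int)) (cur cnt : Int),
      ((rest.foldl (fun (acc : List (List Int) × Int × Int) x =>
          if x = acc.2.1 then (acc.1, acc.2.1, acc.2.2 + 1)
          else (acc.1 ++ [[acc.2.1, acc.2.2]], x, 1)) (whole, cur, cnt)).1
        ++ [[(rest.foldl (fun (acc : List (List Int) × Int × Int) x =>
          if x = acc.2.1 then (acc.1, acc.2.1, acc.2.2 + 1)
          else (acc.1 ++ [[acc.2.1, acc.2.2]], x, 1)) (whole, cur, cnt)).2.1,
            (rest.foldl (fun (acc : List (List Int) × Int × Int) x =>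
          if x = acc.2.1 then (acc.1, acc.2.1, acc.2.2 + 1)
          else (acc.1 ++ [[acc.2.1, acc.2.2]], x, 1)) (whole, cur, cnt)).2.2]])
        = whole ++ pvGo cur cnt rest := by
  intro rest
  induction rest with
  | nil => intro whole cur cnt; simp [pvGo]
  | cons y ys ih =>
      intro whole cur cnt
      by_cases hy : y = cur
      · rw [List.foldl_cons]
        dsimp only
        rw [if_pos hy, ih whole cur (cnt + 1)]
        simp [pvGo, hy]
      · rw [List.foldl_cons]
        dsimp only
        rw [if_neg hy, ih (whole ++ [[cur, cnt]]) y 1]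
        simp [pvGo, hy]

theorem pv_go_spec :
    ∀ (rest : List Int) (cur cnt : Int), rest.Pairwise (· ≤ ·) → (∀ y ∈ rest, cur ≤ y) →
      pvGo cur cnt rest
        = [cur, cnt + ((List.count cur rest : Nat) : Int)] :: pvRuns (rest.filter (fun y => y ≠ cur)) := by
  intro rest
  induction rest with
  | nil => intro cur cnt _ _; simp [pvGo, pvRuns]
  | cons y ys ih =>
      intro cur cnt hp hle
      by_cases hy : y = cur
      · subst hy
        have hp' := hp.of_cons
        have hle' : ∀ z ∈ ys, y ≤ z := (List.pairwise_cons.mp hp).1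
        rw [show pvGo y cnt (y :: ys) = pvGo y (cnt + 1) ys by simp [pvGo]]
        rw [ih y (cnt + 1) hp' hle']
        simp [List.count_cons_self]
        ring
      · have hyy : cur < y := lt_of_le_of_ne (hle y (by simp)) (Ne.symm hy)
        have hall : ∀ z ∈ ys, cur < z := by
          intro z hz
          exact lt_of_lt_of_le hyy ((List.pairwise_cons.mp hp).1 z hz)
        have hcount : List.count cur (y :: ys) = 0 := by
          rw [List.count_eq_zero]
          intro hmem
          rcases List.mem_cons.mp hmem with h | h
          · exact hy h.symm
          · exact absurd rfl (ne_of_gt (hall cur h)).symm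
        have hfilter : (y :: ys).filter (fun z => z ≠ cur) = y :: ys := by
          rw [List.filter_eq_self]
          intro z hz
          rcases List.mem_cons.mp hz with h | h
          · subst h; simpa using hy
          · simpa using (ne_of_gt (hall z h))
        rw [show pvGo cur cnt (y :: ys) = [cur, cnt] :: pvGo y 1 ys by simp [pvGo, hy]]
        rw [hcount, hfilter]
        simp [pvRuns]

theorem pv_foldl_add_skip (x : Int) :
    ∀ (l acc : List Int), x ∈ acc →
      l.foldl PySem.Set.add acc = (l.filter (fun y => y ≠ x)).foldl PySem.Set.add acc := by
  intro l
  induction l with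
  | nil => intro acc _; rfl
  | cons y ys ih =>
      intro acc hx
      by_cases hy : y = x
      · subst hy
        have : PySem.Set.add acc y = acc := by simp [PySem.Set.add, hx]
        simp only [List.foldl_cons, this, List.filter_cons]
        simp only [ne_eq, not_true_eq_false, decide_false]
        exact ih acc hx
      · simp only [List.foldl_cons, List.filter_cons]
        simp only [ne_eq, hy, not_false_eq_true, decide_true]
        exact ih (PySem.Set.add acc y) ((PySem.Set.mem_add acc y x).mpr (Or.inl hx))

theorem pv_foldl_add_cons (x : Int) :
    ∀ (l acc : List Int), x ∉ l →
      l.foldl PySem.Set.add (x :: acc) = x :: l.foldl PySem.Set.add acc := by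
  intro l
  induction l with
  | nil => intro acc _; rfl
  | cons y ys ih =>
      intro acc hx
      have hyx : y ≠ x := by intro h; exact hx (by simp [h])
      have hx' : x ∉ ys := fun h => hx (by simp [h])
      have hadd : PySem.Set.add (x :: acc) y = x :: PySem.Set.add acc y := by
        by_cases hm : y ∈ acc
        · simp [PySem.Set.add, hm, hyx]
        · simp [PySem.Set.add, hm, hyx]
      rw [List.foldl_cons, hadd, ih _ hx', List.foldl_cons]

theorem pv_dedup_cons (x : Int) (ys : List Int) :
    PySem.List.dedup (x :: ys) = x :: PySem.List.dedup (ys.filter (fun y => y ≠ x)) := by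
  simp only [PySem.List.dedup, PySem.Set.ofList, List.foldl_cons]
  have h1 : PySem.Set.add PySem.Set.empty x = [x] := by rfl
  rw [h1]
  rw [pv_foldl_add_skip x ys [x] (by simp)]
  have hx : x ∉ ys.filter (fun y => y ≠ x) := by
    intro h
    simpa using (List.of_mem_filter h)
  exact pv_foldl_add_cons x _ [] hx

theorem pv_foldl_add_sublist :
    ∀ (l acc : List Int), List.Sublist (l.foldl PySem.Set.add acc) (acc ++ l) := by
  intro l
  induction l with
  | nil => intro acc; simp
  | cons y ys ih =>
      intro acc
      have h1 := ih (PySem.Set.add acc y)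
      have h2 : List.Sublist (PySem.Set.add acc y ++ ys) (acc ++ y :: ys) := by
        by_cases hm : y ∈ acc
        · simp only [PySem.Set.add]
          rw [if_pos (by simpa using hm)]
          exact List.Sublist.append_left (List.sublist_cons_self y ys) acc
        · simp only [PySem.Set.add]
          rw [if_neg (by simpa using hm)]
          simp
      rw [List.foldl_cons]
      exact h1.trans h2

theorem pv_runs_spec :
    ∀ (n : Nat) (s : List Int), s.length ≤ n → s.Pairwise (· ≤ ·) →
      pvRuns s = (PySem.List.dedup s).map (fun v => [v, ((List.count v s : Nat) : Int)]) := by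
  intro n
  induction n with
  | zero =>
      intro s hlen _
      have : s = [] := List.eq_nil_of_length_eq_zero (Nat.le_zero.mp hlen)
      subst this; rfl
  | succ n ih =>
      intro s hlen hp
      cases s with
      | nil => rfl
      | cons x ys =>
          have hp' := (List.pairwise_cons.mp hp).2
          have hle := (List.pairwise_cons.mp hp).1
          have h1 : pvRuns (x :: ys) = pvGo x 1 ys := rfl
          rw [h1, pv_go_spec ys x 1 hp' hle, pv_dedup_cons]
          have hlen' : (ys.filter (fun y => y ≠ x)).length ≤ n := by
            have := List.length_filter_le (fun y => decide (y ≠ x)) ys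
            simp at hlen
            omega
          have hpf : (ys.filter (fun y => y ≠ x)).Pairwise (· ≤ ·) := hp'.filter _
          rw [ih _ hlen' hpf]
          rw [List.map_cons]
          congr 1
          · have : List.count x (x :: ys) = List.count x ys + 1 := List.count_cons_self
            rw [this]
            push_cast
            ring_nf
          · apply List.map_congr_left
            intro v hv
            have hvf : v ∈ ys.filter (fun y => y ≠ x) := by
              have := (PySem.List.mem_dedup _ v).mp hv
              exact this
            have hvx : v ≠ x := by simpa using (List.of_mem_filter hvf)
            have hc1 : List.count v (x :: ys) = List.count v ys :=
              List.count_cons_of_ne hvx.symm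
            have hc2 : List.count v (ys.filter (fun y => y ≠ x)) = List.count v ys :=
              List.count_filter (by simpa using hvx)
            rw [hc1, hc2]

theorem pv_B_eq (xs : List Int) : createWholeList_alt xs = pvCanon xs := by
  unfold createWholeList_alt
  cases h : PySem.List.sorted xs (fun x => x) false with
  | nil =>
      have hnil : xs = [] := (PySem.List.sorted_eq_nil_iff xs _ false).mp h
      subst hnil
      rfl
  | cons s0 rest =>
      have hperm : (s0 :: rest).Perm xs := by
        have := PySem.List.sorted_perm xs (fun x : Int => x) false
        rwa [h] at this
      have hp : (s0 :: rest).Pairwise (· ≤ ·) := by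
        have := PySem.List.sorted_pairwise xs (fun x : Int => x)
        rwa [h] at this
      dsimp only
      rw [pv_foldB_eq_go (s0 :: rest) [] s0 0]
      rw [show pvGo s0 0 (s0 :: rest) = pvRuns (s0 :: rest) by simp [pvGo, pvRuns]]
      rw [pv_runs_spec (s0 :: rest).length _ le_rfl hp]
      have hdedup : PySem.List.dedup (s0 :: rest)
          = PySem.List.sorted (PySem.List.dedup xs) (fun v => v) false := by
        apply Eq.symm
        apply PySem.List.sorted_eq_of_perm_of_pairwise_lt
        · apply (List.perm_ext_iff_of_nodup (PySem.List.nodup_dedup _) (PySem.List.nodup_dedup _)).mpr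
          intro a
          rw [PySem.List.mem_dedup, PySem.List.mem_dedup]
          exact hperm.mem_iff
        · have hsub : List.Sublist (PySem.List.dedup (s0 :: rest)) (s0 :: rest) := by
            simpa using pv_foldl_add_sublist (s0 :: rest) []
          have hle : (PySem.List.dedup (s0 :: rest)).Pairwise (· ≤ ·) := hp.sublist hsub
          have hne : (PySem.List.dedup (s0 :: rest)).Pairwise (· ≠ ·) :=
            PySem.List.nodup_dedup _
          exact (hle.and hne).imp (fun hab => lt_of_le_of_ne hab.1 hab.2)
      rw [hdedup]
      unfold pvCanon
      apply List.map_congr_left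
      intro v _
      rw [hperm.count_eq]

-- ===== VERDICT (by name: the statement is the Claim_ definition above) =====
theorem createWholeList_spec : Claim_equal_createWholeList := by
  intro xs _
  unfold Spec_createWholeList
  rw [pv_A_eq, pv_B_eq]
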